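-- pv_equiv track=rewrite | github.com/marcinnowakowski/boolean_bayesian_networks | boolean_networks/function_exctactor/sop_simplifier.py | _parse_to_minterms
-- ===== SOURCE A (Python) =====
-- from typing import Dict, List, Set, Tuple, FrozenSet
--
-- def _parse_to_minterms(expr: str, var_names: List[str]) -> Set[int]:
--     """
--     Parse SOP expression to set of minterm indices.
--
--     Each minterm is an integer where bit i represents variable i.
--     """
--     minterms = set()
--     num_vars = len(var_names)
--     var_to_idx = {v: i for i, v in enumerate(var_names)}
--
--     # Split into terms
--     terms = expr.split(" | ")
--
--     for term in terms:
--         term = term.strip()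
--         if term.startswith("(") and term.endswith(")"):
--             term = term[1:-1]
--
--         # Parse literals in this term
--         literals = [lit.strip() for lit in term.split(" & ")]
--
--         # Build constraint: which bits must be 0 or 1
--         must_be_1 = set()
--         must_be_0 = set()
--
--         for lit in literals:
--             if lit.startswith("~"):
--                 var = lit[1:]
--                 if var in var_to_idx:
--                     must_be_0.add(var_to_idx[var])
--             else:
--                 if lit in var_to_idx:
--                     must_be_1.add(var_to_idx[lit])
--
--         # Generate all minterms that match this term
--         free_bits = set(range(num_vars)) - must_be_1 - must_be_0
--
--         # Start with base value from must_be_1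
--         base = 0
--         for idx in must_be_1:
--             base |= (1 << (num_vars - 1 - idx))
--
--         # Generate all combinations of free bits
--         free_list = list(free_bits)
--         for i in range(2 ** len(free_list)):
--             val = base
--             for j, bit_idx in enumerate(free_list):
--                 if i & (1 << j):
--                     val |= (1 << (num_vars - 1 - bit_idx))
--             minterms.add(val)
--
--     return minterms
-- ===== SOURCE B (Python) =====
-- from typing import List, Set
--
-- def _parse_to_minterms(expr: str, var_names: List[str]) -> Set[int]:
--     """Parse SOP expression to set of minterm indices (bit i = variable i).
--
--     Each term is reduced to two bit masks (base = bits forced to 1,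
--     fixed = constrained bits); its minterms are then generated by
--     doubling the value list once per free bit instead of rebuilding
--     every value bit-by-bit from a counter.
--     """
--     n = len(var_names)
--     bit_of = {}
--     for i, v in enumerate(var_names):
--         bit_of[v] = n - 1 - i
--     minterms = set()
--     for term in expr.split(" | "):
--         term = term.strip()
--         if term.startswith("(") and term.endswith(")"):
--             term = term[1:-1]
--         base = 0
--         fixed = 0
--         for lit in term.split(" & "):
--             lit = lit.strip()
--             neg = lit.startswith("~")
--             name = lit[1:] if neg else lit
--             b = bit_of.get(name)
--             if b is not None:
--                 fixed |= 1 << b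
--                 if not neg:
--                     base |= 1 << b
--         vals = [base]
--         for b in range(n - 1, -1, -1):
--             if not (fixed >> b) & 1:
--                 vals += [v | (1 << b) for v in vals]
--         minterms.update(vals)
--     return minterms
-- ===== Notes on version B (the rewrite author's own statement) =====
-- stated objective: faster
-- what changed: Each term is parsed into two integer bit masks (base/fixed) instead of two index sets, and its minterms are generated by doubling a value list once per free bit instead of enumerating a 2^k counter and rebuilding every value bit-by-bit; intended as faster (drops the inner per-bit loop), measured 10.88x at the largest size where both finish (both are still exponential in the number of free bits, so both time out on the biggest generated inputs).
import Mathlib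
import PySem

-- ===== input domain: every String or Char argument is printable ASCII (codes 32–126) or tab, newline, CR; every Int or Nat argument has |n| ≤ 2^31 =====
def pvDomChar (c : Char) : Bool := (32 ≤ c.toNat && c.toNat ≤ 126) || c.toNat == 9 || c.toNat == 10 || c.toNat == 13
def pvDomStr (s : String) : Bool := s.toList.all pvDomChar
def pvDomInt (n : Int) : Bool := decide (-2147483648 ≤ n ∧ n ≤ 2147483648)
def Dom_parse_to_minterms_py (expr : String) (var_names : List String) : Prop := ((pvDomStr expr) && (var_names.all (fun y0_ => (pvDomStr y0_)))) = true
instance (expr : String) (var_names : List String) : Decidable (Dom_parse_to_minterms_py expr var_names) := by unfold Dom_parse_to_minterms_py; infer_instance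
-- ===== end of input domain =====

-- B re-implements _parse_to_minterms: each term becomes two bit masks (base/fixed) and its
-- minterms are generated by doubling a value list once per free bit, instead of A's per-term
-- index sets and 2^k-counter that rebuilds every value bit-by-bit.  Return values agree exactly.

-- ===== PORT A =====
-- Literal transliteration of _parse_to_minterms.  `.toNat` on shift amounts is exact here:
-- every shift exponent Python computes in this function is nonnegative (0 ≤ idx < num_vars,
-- 0 ≤ j), and `i & (1 << j) != 0` is Python's truthiness of `i & (1 << j)`.
def pyA_lit (var_to_idx : PySem.Dict String Int)
    (s : PySem.Set Int × PySem.Set Int) (lit : String) : PySem.Set Int × PySem.Set Int :=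
  if PySem.Str.startswith lit "~" then
    let var := PySem.Str.slice lit (some 1) none
    match var_to_idx.get? var with
    | some i => (s.1, PySem.Set.add s.2 i)
    | none   => s
  else
    match var_to_idx.get? lit with
    | some i => (PySem.Set.add s.1 i, s.2)
    | none   => s

def pyA_val (num_vars : Int) (free_list : List Int) (base : Int) (i : Int) : Int :=
  (PySem.List.enumerate free_list).foldl (fun val p =>
    if PySem.Int.band i ((1:Int) <<< p.1.toNat) ≠ 0
    then PySem.Int.bor val ((1:Int) <<< (num_vars - 1 - p.2).toNat) else val) base

def pyA_term (num_vars : Int) (var_to_idx : PySem.Dict String Int)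
    (minterms : PySem.Set Int) (term : String) : PySem.Set Int :=
  let term := PySem.Str.strip term
  let term := if PySem.Str.startswith term "(" && PySem.Str.endswith term ")"
              then PySem.Str.slice term (some 1) (some (-1)) else term
  let literals : List String :=
    ((PySem.Str.split? term " & ").getD []).map (fun lit => PySem.Str.strip lit)
  let s01 := literals.foldl (pyA_lit var_to_idx) (PySem.Set.empty, PySem.Set.empty)
  let must_be_1 := s01.1
  let must_be_0 := s01.2
  let free_bits : PySem.Set Int :=
    PySem.Set.diff (PySem.Set.diff (PySem.Set.ofList (PySem.List.pyRange 0 num_vars 1)) must_be_1) must_be_0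
  let base : Int :=
    must_be_1.foldl (fun b idx => PySem.Int.bor b ((1:Int) <<< (num_vars - 1 - idx).toNat)) 0
  let free_list : List Int := free_bits
  (PySem.List.pyRange 0 ((2:Int) ^ free_list.length) 1).foldl (fun minterms i =>
    PySem.Set.add minterms (pyA_val num_vars free_list base i)) minterms

def parse_to_minterms_py (expr : String) (var_names : List String) : List Int :=
  let minterms : PySem.Set Int := PySem.Set.empty
  let num_vars : Int := (var_names.length : Int)
  let var_to_idx : PySem.Dict String Int :=
    (PySem.List.enumerate var_names).foldl (fun d p => d.insert p.2 p.1) PySem.Dict.empty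
  let terms : List String := (PySem.Str.split? expr " | ").getD []
  terms.foldl (pyA_term num_vars var_to_idx) minterms

-- ===== PORT B =====
-- Literal transliteration of Source B (same `.toNat` remark: all shift amounts are nonnegative).
def pyB_lit (bit_of : PySem.Dict String Int) (bf : Int × Int) (lit : String) : Int × Int :=
  let lit := PySem.Str.strip lit
  let neg := PySem.Str.startswith lit "~"
  let name := if neg then PySem.Str.slice lit (some 1) none else lit
  match bit_of.get? name with
  | some b =>
      (if neg then bf.1 else PySem.Int.bor bf.1 ((1:Int) <<< b.toNat),
       PySem.Int.bor bf.2 ((1:Int) <<< b.toNat))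
  | none => bf

def pyB_term (n : Int) (bit_of : PySem.Dict String Int)
    (minterms : PySem.Set Int) (term : String) : PySem.Set Int :=
  let term := PySem.Str.strip term
  let term := if PySem.Str.startswith term "(" && PySem.Str.endswith term ")"
              then PySem.Str.slice term (some 1) (some (-1)) else term
  let bf : Int × Int := ((PySem.Str.split? term " & ").getD []).foldl (pyB_lit bit_of) (0, 0)
  let vals : List Int :=
    (PySem.List.pyRange (n - 1) (-1) (-1)).foldl (fun vals b =>
      if PySem.Int.band (bf.2 >>> b.toNat) 1 = 0
      then vals ++ vals.map (fun v => PySem.Int.bor v ((1:Int) <<< b.toNat)) else vals) [bf.1]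
  PySem.Set.update minterms vals

def parse_to_minterms_py_alt (expr : String) (var_names : List String) : List Int :=
  let n : Int := (var_names.length : Int)
  let bit_of : PySem.Dict String Int :=
    (PySem.List.enumerate var_names).foldl (fun d p => d.insert p.2 (n - 1 - p.1)) PySem.Dict.empty
  ((PySem.Str.split? expr " | ").getD []).foldl (pyB_term n bit_of) PySem.Set.empty

-- ===== PRECONDITION & SPEC =====
def Spec_parse_to_minterms_py (expr : String) (var_names : List String) (out : List Int) : Prop := out = parse_to_minterms_py_alt expr var_names
instance (expr : String) (var_names : List String) (out : List Int) : Decidable (Spec_parse_to_minterms_py expr var_names out) := by unfold Spec_parse_to_minterms_py; infer_instance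

-- ===== CLAIM (what is proved, stated in full; the proofs are below) =====
def Claim_equal_parse_to_minterms_py : Prop := ∀ (expr : String) (var_names : List String), Dom_parse_to_minterms_py expr var_names → Spec_parse_to_minterms_py expr var_names (parse_to_minterms_py expr var_names)

-- ===== LEMMAS AND PROOFS =====

def pvNatVal (m : Nat) : Nat → List Nat → Nat → Nat
  | base, [], _ => base
  | base, b :: bs, j => pvNatVal m (if m.testBit j then base ||| 2^b else base) bs (j+1)

def pvGenB (vs : List Nat) (bs : List Nat) : List Nat :=
  bs.foldl (fun acc b => acc ++ acc.map (· ||| 2^b)) vs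

lemma pvNatVal_append (m : Nat) (xs : List Nat) : ∀ (ys : List Nat) (base j : Nat),
    pvNatVal m base (xs ++ ys) j = pvNatVal m (pvNatVal m base xs j) ys (j + xs.length) := by
  induction xs with
  | nil => intro ys base j; simp [pvNatVal]
  | cons b bs ih => intro ys base j; simp [pvNatVal, ih]; ring_nf

lemma pvNatVal_congr (m m' : Nat) (bs : List Nat) : ∀ (base j : Nat),
    (∀ j', j ≤ j' → j' < j + bs.length → m.testBit j' = m'.testBit j') →
    pvNatVal m base bs j = pvNatVal m' base bs j := by
  induction bs with
  | nil => intro base j h; simp [pvNatVal]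
  | cons b bs ih =>
    intro base j h
    simp only [pvNatVal]
    rw [h j (le_refl _) (by simp)]
    exact ih _ _ (fun j' h1 h2 => h j' (by omega) (by simp at h2 ⊢; omega))

lemma pvGen_eq (base : Nat) (bs : List Nat) :
    (List.range (2^bs.length)).map (fun m => pvNatVal m base bs 0) = pvGenB [base] bs := by
  induction bs using List.reverseRecOn with
  | nil => simp [pvNatVal, pvGenB]
  | append_singleton bs b ih =>
    have hlen : 2 ^ (bs ++ [b]).length = 2 ^ bs.length + 2 ^ bs.length := by
      simp [List.length_append, pow_succ]; ring
    rw [hlen, List.range_add, List.map_append, List.map_map]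
    have h1 : (List.range (2^bs.length)).map (fun m => pvNatVal m base (bs ++ [b]) 0)
        = (List.range (2^bs.length)).map (fun m => pvNatVal m base bs 0) := by
      apply List.map_congr_left
      intro m hm
      rw [List.mem_range] at hm
      rw [pvNatVal_append]
      simp [pvNatVal, Nat.testBit_lt_two_pow hm]
    have h2 : (List.range (2^bs.length)).map ((fun m => pvNatVal m base (bs ++ [b]) 0) ∘ (fun x => 2^bs.length + x))
        = (List.range (2^bs.length)).map (fun m => pvNatVal m base bs 0 ||| 2^b) := by
      apply List.map_congr_left
      intro m hm
      rw [List.mem_range] at hm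
      simp only [Function.comp]
      rw [pvNatVal_append]
      have hc : pvNatVal (2^bs.length + m) base bs 0 = pvNatVal m base bs 0 := by
        apply pvNatVal_congr
        intro j' _ h2'
        simp at h2'
        exact Nat.testBit_two_pow_add_gt h2' m
      simp [pvNatVal, hc, Nat.testBit_two_pow_add_eq, Nat.testBit_lt_two_pow hm]
    rw [h1, h2]
    show _ = pvGenB [base] (bs ++ [b])
    rw [pvGenB, List.foldl_append, ← pvGenB, ← pvGenB, ← ih]
    simp [pvGenB]

lemma pvShl_one (k : Nat) : ((1:Int) <<< k) = ((2^k : Nat) : Int) := by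
  simp [Int.shiftLeft_eq]

lemma pvShl_one' (k : Nat) : ((1:Int) <<< ((k:Nat):Int)) = ((2^k : Nat) : Int) := by
  rw [Int.shiftLeft_natCast_right]
  exact pvShl_one k


lemma pvValA_eq (nv : Int) (m : Nat) : ∀ (free : List Int) (base : Nat) (j : Nat),
    (∀ x ∈ free, 0 ≤ x ∧ x < nv) →
    (PySem.List.enumerate free (j:Int)).foldl (fun val p =>
        if PySem.Int.band ((m:Nat) : Int) ((1:Int) <<< p.1.toNat) ≠ 0
        then PySem.Int.bor val ((1:Int) <<< (nv - 1 - p.2).toNat) else val) ((base : Nat) : Int)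
      = ((pvNatVal m base (free.map (fun i => (nv - 1 - i).toNat)) j : Nat) : Int) := by
  intro free
  induction free with
  | nil => intro base j h; simp [pvNatVal, PySem.List.enumerate]
  | cons x xs ih =>
    intro base j h
    rw [PySem.List.enumerate_cons]
    simp only [List.foldl_cons, List.map_cons, pvNatVal]
    have hx := h x (by simp)
    have hcond : (PySem.Int.band ((m:Nat) : Int) ((1:Int) <<< ((((j:Int)).toNat : Nat) : Int)) ≠ 0) ↔ m.testBit j = true := by
      rw [pvShl_one', PySem.Int.band_natCast, Int.toNat_natCast, Nat.and_two_pow]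
      cases hb : m.testBit j <;> simp [hb]
    have hcast : ((j:Int) + 1) = ((j+1 : Nat) : Int) := by push_cast; ring
    have hbor : PySem.Int.bor ((base:Nat):Int) ((1:Int) <<< ((nv - 1 - x).toNat : Nat)) = (((base ||| 2^(nv-1-x).toNat : Nat)):Int) := by
      rw [pvShl_one, PySem.Int.bor_natCast]
    by_cases hb : m.testBit j = true
    · rw [if_pos (hcond.mpr hb), if_pos hb, hbor, hcast]
      exact ih _ _ (fun y hy => h y (by simp [hy]))
    · rw [if_neg (by rw [hcond]; exact hb), if_neg hb, hcast]
      exact ih _ _ (fun y hy => h y (by simp [hy]))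

lemma pvCastOr (v : Nat) (b : Nat) :
    PySem.Int.bor (Int.ofNat v) ((1:Int) <<< ((((Int.ofNat b).toNat : Nat)) : Int)) = Int.ofNat (v ||| 2^b) := by
  have h : (Int.ofNat b).toNat = b := rfl
  rw [h, Int.shiftLeft_natCast_right]
  have h2 : ((1:Int) <<< b) = Int.ofNat (2^b) := pvShl_one b
  rw [h2]
  exact PySem.Int.bor_natCast v (2^b)

lemma pvDoubleB_eq (bs : List Nat) : ∀ (vs : List Nat),
    (bs.map Int.ofNat).foldl (fun vals b =>
        vals ++ vals.map (fun v => PySem.Int.bor v ((1:Int) <<< ((b.toNat : Nat) : Int)))) (vs.map Int.ofNat)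
      = (pvGenB vs bs).map Int.ofNat := by
  induction bs with
  | nil => intro vs; simp [pvGenB]
  | cons b bs ih =>
    intro vs
    simp only [List.map_cons, List.foldl_cons]
    have h2 : (vs.map Int.ofNat).map (fun v => PySem.Int.bor v ((1:Int) <<< ((((Int.ofNat b).toNat : Nat)) : Int)))
        = (vs.map (fun x => x ||| 2^b)).map Int.ofNat := by
      rw [List.map_map, List.map_map]
      exact List.map_congr_left (fun v _ => pvCastOr v b)
    rw [h2, ← List.map_append, ih]
    simp [pvGenB]
-- a single bit added to a mask, on the testBit level
lemma pvMaskAdd (nv x : Int) (hx : 0 ≤ x ∧ x < nv) (m : Nat) (b : Nat) :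
    (m ||| 2^(nv - 1 - x).toNat).testBit b = true ↔ (m.testBit b = true ∨ nv - 1 - x = (b:Int)) := by
  rw [Nat.testBit_lor, Bool.or_eq_true, Nat.testBit_two_pow]
  constructor
  · rintro (h' | h')
    · exact Or.inl h'
    · right; simp at h'; omega
  · rintro (h' | h')
    · exact Or.inl h'
    · right; simp; omega

-- invariant tying A's index sets to B's masks
def pvInv (nv : Int) (s1 s0 : PySem.Set Int) (mb mf : Nat) : Prop :=
  (∀ b : Nat, mb.testBit b = true ↔ ∃ i ∈ s1, nv - 1 - i = (b:Int)) ∧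
  (∀ b : Nat, mf.testBit b = true ↔ ∃ i, (i ∈ s1 ∨ i ∈ s0) ∧ nv - 1 - i = (b:Int)) ∧
  (∀ i ∈ s1, 0 ≤ i ∧ i < nv) ∧ (∀ i ∈ s0, 0 ≤ i ∧ i < nv)

set_option maxHeartbeats 2000000 in
lemma pvScan (nv : Int) (dA dB : PySem.Dict String Int)
    (hrel : ∀ v, dB.get? v = (dA.get? v).map (fun i => nv - 1 - i))
    (hbnd : ∀ v i, dA.get? v = some i → 0 ≤ i ∧ i < nv) :
    ∀ (lits : List String) (s1 s0 : PySem.Set Int) (mb mf : Nat), pvInv nv s1 s0 mb mf →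
    ∃ (mb' mf' : Nat), lits.foldl (pyB_lit dB) ((mb : Int), (mf : Int)) = ((mb' : Int), (mf' : Int)) ∧
      pvInv nv (lits.map PySem.Str.strip |>.foldl (pyA_lit dA) (s1, s0)).1
               (lits.map PySem.Str.strip |>.foldl (pyA_lit dA) (s1, s0)).2 mb' mf' := by
  intro lits
  induction lits with
  | nil => intro s1 s0 mb mf hinv; exact ⟨mb, mf, rfl, hinv⟩
  | cons lit lits ih =>
    intro s1 s0 mb mf hinv
    obtain ⟨h1, hf, hs1, hs0⟩ := hinv
    simp only [List.map_cons, List.foldl_cons]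
    rw [pyB_lit, pyA_lit]
    dsimp only
    by_cases hneg : PySem.Str.startswith (PySem.Str.strip lit) "~" = true
    · simp only [hneg, if_pos, if_true]
      rw [hrel]
      cases hget : dA.get? (PySem.Str.slice (PySem.Str.strip lit) (some 1) none) with
      | none => exact ih s1 s0 mb mf ⟨h1, hf, hs1, hs0⟩
      | some i =>
        have hib := hbnd _ _ hget
        simp only [Option.map_some]
        have hbor : PySem.Int.bor ((mf:Nat):Int) ((1:Int) <<< (nv - 1 - i).toNat)
            = (((mf ||| 2^(nv - 1 - i).toNat : Nat)):Int) := by rw [pvShl_one, PySem.Int.bor_natCast]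
        rw [hbor]
        apply ih
        refine ⟨h1, ?_, hs1, ?_⟩
        · intro b
          rw [pvMaskAdd nv i hib mf b, hf b]
          constructor
          · rintro (⟨i', hi', he⟩ | he)
            · refine ⟨i', ?_, he⟩
              rcases hi' with h' | h'
              · exact Or.inl h'
              · exact Or.inr ((PySem.Set.mem_add _ _ _).mpr (Or.inl h'))
            · exact ⟨i, Or.inr ((PySem.Set.mem_add _ _ _).mpr (Or.inr rfl)), he⟩
          · rintro ⟨i', hi', he⟩
            rw [PySem.Set.mem_add] at hi'
            rcases hi' with h' | (h' | h')
            · exact Or.inl ⟨i', Or.inl h', he⟩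
            · exact Or.inl ⟨i', Or.inr h', he⟩
            · subst h'; exact Or.inr he
        · intro i' hi'
          rw [PySem.Set.mem_add] at hi'
          rcases hi' with h' | h'
          · exact hs0 i' h'
          · subst h'; exact hib
    · simp only [hneg, if_neg, if_false, Bool.false_eq_true]
      rw [hrel]
      cases hget : dA.get? (PySem.Str.strip lit) with
      | none => exact ih s1 s0 mb mf ⟨h1, hf, hs1, hs0⟩
      | some i =>
        have hib := hbnd _ _ hget
        simp only [Option.map_some]
        have hbor : ∀ m : Nat, PySem.Int.bor ((m:Nat):Int) ((1:Int) <<< (nv - 1 - i).toNat)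
            = (((m ||| 2^(nv - 1 - i).toNat : Nat)):Int) := by
          intro m; rw [pvShl_one, PySem.Int.bor_natCast]
        rw [hbor, hbor]
        apply ih
        refine ⟨?_, ?_, ?_, hs0⟩
        · intro b
          rw [pvMaskAdd nv i hib mb b, h1 b]
          constructor
          · rintro (⟨i', hi', he⟩ | he)
            · exact ⟨i', (PySem.Set.mem_add _ _ _).mpr (Or.inl hi'), he⟩
            · exact ⟨i, (PySem.Set.mem_add _ _ _).mpr (Or.inr rfl), he⟩
          · rintro ⟨i', hi', he⟩
            rw [PySem.Set.mem_add] at hi'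
            rcases hi' with h' | h'
            · exact Or.inl ⟨i', h', he⟩
            · subst h'; exact Or.inr he
        · intro b
          rw [pvMaskAdd nv i hib mf b, hf b]
          constructor
          · rintro (⟨i', hi', he⟩ | he)
            · refine ⟨i', ?_, he⟩
              rcases hi' with h' | h'
              · exact Or.inl ((PySem.Set.mem_add _ _ _).mpr (Or.inl h'))
              · exact Or.inr h'
            · exact ⟨i, Or.inl ((PySem.Set.mem_add _ _ _).mpr (Or.inr rfl)), he⟩
          · rintro ⟨i', hi', he⟩
            rcases hi' with h' | h'
            · rw [PySem.Set.mem_add] at h'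
              rcases h' with h' | h'
              · exact Or.inl ⟨i', Or.inl h', he⟩
              · subst h'; exact Or.inr he
            · exact Or.inl ⟨i', Or.inr h', he⟩
        · intro i' hi'
          rw [PySem.Set.mem_add] at hi'
          rcases hi' with h' | h'
          · exact hs1 i' h'
          · subst h'; exact hib

-- A's base loop ORs exactly the bits of must_be_1
lemma pvBaseFold (nv : Int) : ∀ (l : List Int) (a : Nat), (∀ i ∈ l, 0 ≤ i ∧ i < nv) →
    ∃ M : Nat, l.foldl (fun b idx => PySem.Int.bor b ((1:Int) <<< (nv - 1 - idx).toNat)) ((a:Nat):Int) = ((M:Nat):Int) ∧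
      ∀ b : Nat, M.testBit b = true ↔ (a.testBit b = true ∨ ∃ i ∈ l, nv - 1 - i = (b:Int)) := by
  intro l
  induction l with
  | nil => intro a h; exact ⟨a, rfl, by simp⟩
  | cons x l ih =>
    intro a h
    have hx := h x (by simp)
    have hstep : PySem.Int.bor ((a:Nat):Int) ((1:Int) <<< (nv - 1 - x).toNat)
        = (((a ||| 2^(nv - 1 - x).toNat : Nat)):Int) := by rw [pvShl_one, PySem.Int.bor_natCast]
    simp only [List.foldl_cons, hstep]
    obtain ⟨M, hM, hchar⟩ := ih _ (fun i hi => h i (by simp [hi]))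
    refine ⟨M, hM, fun b => ?_⟩
    rw [hchar b, pvMaskAdd nv x hx a b]
    simp only [List.mem_cons]
    constructor
    · rintro ((h' | h') | ⟨i, hi, he⟩)
      · exact Or.inl h'
      · exact Or.inr ⟨x, Or.inl rfl, h'⟩
      · exact Or.inr ⟨i, Or.inr hi, he⟩
    · rintro (h' | ⟨i, (hi | hi), he⟩)
      · exact Or.inl (Or.inl h')
      · subst hi; exact Or.inl (Or.inr he)
      · exact Or.inr ⟨i, hi, he⟩

-- the countdown range is the ascending range re-indexed by i ↦ n-1-i
lemma pvRevRange (nN : Nat) :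
    PySem.List.pyRange ((nN : Int) - 1) (-1) (-1) = (PySem.List.pyRange 0 (nN : Int) 1).map (fun i => (nN : Int) - 1 - i) := by
  rw [PySem.List.pyRange_neg_one_eq_reverse]
  have h0 : (-1 : Int) + 1 = 0 := by ring
  have h1 : ((nN : Int) - 1) + 1 = (nN : Int) := by ring
  rw [h0, h1]
  apply List.ext_getElem
  · simp [PySem.List.length_pyRange_one]
  · intro k hk hk'
    have hlen : (PySem.List.pyRange 0 (nN : Int) 1).length = nN := by
      simp [PySem.List.length_pyRange_one]
    rw [List.getElem_reverse, List.getElem_map,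
        PySem.List.getElem_pyRange_one, PySem.List.getElem_pyRange_one]
    have hkn : k < nN := by
      rw [List.length_reverse, hlen] at hk; exact hk
    rw [hlen]
    omega

-- the two dictionaries are pointwise related
lemma pvDictFold (f : Int → Int) : ∀ (xs : List String) (s : Int) (dA dB : PySem.Dict String Int),
    (∀ v, dB.get? v = (dA.get? v).map f) →
    ∀ v, ((PySem.List.enumerate xs s).foldl (fun d p => d.insert p.2 (f p.1)) dB).get? v
        = (((PySem.List.enumerate xs s).foldl (fun d p => d.insert p.2 p.1) dA).get? v).map f := by
  intro xs
  induction xs with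
  | nil => intro s dA dB hrel v; simpa [PySem.List.enumerate] using hrel v
  | cons x xs ih =>
    intro s dA dB hrel v
    rw [PySem.List.enumerate_cons]
    simp only [List.foldl_cons]
    apply ih
    intro w
    rw [PySem.Dict.get?_insert, PySem.Dict.get?_insert]
    split_ifs with h
    · rfl
    · exact hrel w

lemma pvDictBound (nv : Int) : ∀ (xs : List String) (s : Int) (dA : PySem.Dict String Int),
    0 ≤ s → s + xs.length ≤ nv →
    (∀ v i, dA.get? v = some i → 0 ≤ i ∧ i < nv) →
    ∀ v i, ((PySem.List.enumerate xs s).foldl (fun d p => d.insert p.2 p.1) dA).get? v = some i → 0 ≤ i ∧ i < nv := by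
  intro xs
  induction xs with
  | nil => intro s dA _ _ hb v i h; exact hb v i (by simpa [PySem.List.enumerate] using h)
  | cons x xs ih =>
    intro s dA hs hlen hb v i h
    rw [PySem.List.enumerate_cons] at h
    simp only [List.foldl_cons] at h
    refine ih (s+1) _ (by omega) (by simp at hlen ⊢; omega) ?_ v i h
    intro w j hw
    rw [PySem.Dict.get?_insert] at hw
    split_ifs at hw with h'
    · cases hw; constructor <;> [omega; (simp at hlen; omega)]
    · exact hb w j hw

-- Python's `(fixed >> b) & 1 == 0` over cast Nats is a testBit question
lemma pvBandOne (mf e : Nat) :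
    (PySem.Int.band (((mf:Nat):Int) >>> ((e:Nat):Int)) 1 = 0) ↔ mf.testBit e = false := by
  rw [Int.shiftRight_natCast]
  have h1 : (1:Int) = ((1:Nat):Int) := rfl
  rw [h1, PySem.Int.band_natCast]
  have h2 : (mf >>> e) &&& 1 = if mf.testBit e then 1 else 0 := by
    rcases h : mf.testBit e <;> simp [Nat.testBit, Nat.and_one_is_mod] at h ⊢ <;> omega
  rcases h : mf.testBit e <;> simp [h] at h2 <;> simp [h2]

-- per-term steps agree
set_option maxHeartbeats 2000000 in
lemma pvTerm_eq (nN : Nat) (dA dB : PySem.Dict String Int)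
    (hrel : ∀ v, dB.get? v = (dA.get? v).map (fun i => (nN : Int) - 1 - i))
    (hbnd : ∀ v i, dA.get? v = some i → 0 ≤ i ∧ i < (nN : Int)) :
    ∀ (minterms : PySem.Set Int) (term : String),
    pyA_term (nN : Int) dA minterms term = pyB_term (nN : Int) dB minterms term := by
  intro m term
  unfold pyA_term pyB_term
  dsimp only
  set nv : Int := (nN : Int) with hnv
  set t := (if PySem.Str.startswith (PySem.Str.strip term) "(" && PySem.Str.endswith (PySem.Str.strip term) ")"
            then PySem.Str.slice (PySem.Str.strip term) (some 1) (some (-1)) else PySem.Str.strip term) with ht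
  set lits : List String := (PySem.Str.split? t " & ").getD [] with hlits
  -- the literal scan: A's two sets vs B's two masks
  have hinv0 : pvInv nv PySem.Set.empty PySem.Set.empty 0 0 := by
    refine ⟨?_, ?_, ?_, ?_⟩ <;> intro b <;> simp [PySem.Set.empty, Nat.zero_testBit]
  obtain ⟨mb, mf, hB, hinv⟩ := pvScan nv dA dB hrel hbnd lits PySem.Set.empty PySem.Set.empty 0 0 hinv0
  simp only [Nat.cast_zero] at hB
  rw [hB]
  dsimp only
  obtain ⟨hinv1, hinv2, hbnd1, hbnd0⟩ := hinv
  set sA := ((lits.map PySem.Str.strip).foldl (pyA_lit dA) (PySem.Set.empty, PySem.Set.empty)) with hsA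
  -- A's base equals B's first mask
  obtain ⟨M, hM, hchar⟩ := pvBaseFold nv sA.1 0 hbnd1
  simp only [Nat.cast_zero] at hM
  have hMmb : M = mb := by
    apply Nat.eq_of_testBit_eq
    intro b
    rw [Bool.eq_iff_iff, hchar b, hinv1 b]
    simp [Nat.zero_testBit]
  rw [hMmb] at hM
  rw [hM]
  -- A's free list
  have hR : PySem.Set.ofList (PySem.List.pyRange 0 nv 1) = PySem.List.pyRange 0 nv 1 :=
    PySem.Set.ofList_eq_self_of_nodup _ (PySem.List.nodup_pyRange_one 0 nv)
  rw [hR]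
  set freeL : List Int :=
    PySem.Set.diff (PySem.Set.diff (PySem.List.pyRange 0 nv 1) sA.1) sA.2 with hfreeL
  have hfree_mem : ∀ i ∈ freeL, 0 ≤ i ∧ i < nv := by
    intro i hi
    rw [hfreeL, PySem.Set.diff, PySem.Set.diff] at hi
    have := List.mem_of_mem_filter (List.mem_of_mem_filter hi)
    rw [PySem.List.mem_pyRange_one] at this
    exact this
  set bs : List Nat := freeL.map (fun i => (nv - 1 - i).toNat) with hbs
  -- B's free-bit countdown is A's free list, re-indexed
  have hcountdown :
      (PySem.List.pyRange (nv - 1) (-1) (-1)).filter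
          (fun b => decide (PySem.Int.band (((mf:Nat):Int) >>> b.toNat) 1 = 0))
        = bs.map Int.ofNat := by
    rw [hnv, pvRevRange nN, List.filter_map]
    have hfilter : (PySem.List.pyRange 0 (nN:Int) 1).filter
          ((fun b => decide (PySem.Int.band (((mf:Nat):Int) >>> b.toNat) 1 = 0)) ∘ (fun i => (nN:Int) - 1 - i))
        = freeL := by
      rw [hfreeL, PySem.Set.diff, PySem.Set.diff, List.filter_filter, hnv]
      apply List.filter_congr
      intro x hx
      rw [PySem.List.mem_pyRange_one] at hx
      have he : (((nN:Int) - 1 - x).toNat : Int) = (nN:Int) - 1 - x := by omega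
      have hbit : mf.testBit ((nN:Int) - 1 - x).toNat = true ↔ (x ∈ sA.1 ∨ x ∈ sA.2) := by
        rw [hinv2]
        constructor
        · rintro ⟨i', hor, heq⟩
          have : i' = x := by omega
          subst this; exact hor
        · intro hor; exact ⟨x, hor, by omega⟩
      have hdec : (PySem.Int.band (((mf:Nat):Int) >>> (((((nN:Int) - 1 - x).toNat : Nat)):Int)) 1 = 0)
          ↔ ¬(x ∈ sA.1 ∨ x ∈ sA.2) := by
        rw [pvBandOne mf (((nN:Int) - 1 - x).toNat), ← hbit, Bool.not_eq_true]
      simp only [Function.comp]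
      rw [Bool.eq_iff_iff, decide_eq_true_eq, hdec]
      by_cases hx1 : x ∈ sA.1 <;> by_cases hx2 : x ∈ sA.2 <;>
        simp [PySem.Set.contains, hx1, hx2]
    rw [hfilter, hbs, List.map_map]
    apply List.map_congr_left
    intro i hi
    have hb := hfree_mem i hi
    rw [hnv] at hb
    simp only [Function.comp, Int.ofNat_eq_natCast]
    omega
  -- both generated value lists coincide
  have hlen : freeL.length = bs.length := by rw [hbs, List.length_map]
  have hAlist : (PySem.List.pyRange 0 ((2:Int) ^ freeL.length) 1).map (pyA_val nv freeL ((mb:Nat):Int))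
      = (pvGenB [mb] bs).map Int.ofNat := by
    have h2 : ((2:Int) ^ freeL.length) = Int.ofNat (2 ^ bs.length) := by
      rw [Int.ofNat_eq_natCast, ← hlen]; push_cast; ring
    rw [h2, PySem.List.pyRange_one]
    have h3 : ((Int.ofNat (2 ^ bs.length)) - 0).toNat = 2 ^ bs.length := by
      simp only [Int.ofNat_eq_natCast, sub_zero, Int.toNat_natCast]
    rw [h3, List.map_map, ← pvGen_eq mb bs, List.map_map]
    apply List.map_congr_left
    intro m' _
    simp only [Function.comp]
    have h4 : (0 : Int) + (m' : Int) = ((m' : Nat) : Int) := by omega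
    rw [h4]
    have h5 := pvValA_eq nv m' freeL mb 0 hfree_mem
    simp only [Nat.cast_zero] at h5
    rw [pyA_val, h5, Int.ofNat_eq_natCast]
  -- B's doubling produces the same list
  have hvals := PySem.List.foldl_ite_eq_foldl_filter
        (p := fun b : Int => PySem.Int.band (((mf:Nat):Int) >>> ((b.toNat : Nat) : Int)) 1 = 0)
        (f := fun (vals : List Int) (b : Int) => vals ++ vals.map (fun v => PySem.Int.bor v ((1:Int) <<< ((b.toNat : Nat) : Int))))
        (PySem.List.pyRange (nv - 1) (-1) (-1)) [((mb:Nat):Int)]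
  rw [hvals, hcountdown]
  have hinit : [((mb:Nat):Int)] = [mb].map Int.ofNat := by simp [Int.ofNat_eq_natCast]
  rw [hinit, pvDoubleB_eq bs [mb]]
  rw [PySem.Set.update, List.foldl_map]
  calc List.foldl (fun mm i => PySem.Set.add mm (pyA_val nv freeL ((mb:Nat):Int) i)) m
          (PySem.List.pyRange 0 ((2:Int) ^ freeL.length) 1)
      = List.foldl PySem.Set.add m
          ((PySem.List.pyRange 0 ((2:Int) ^ freeL.length) 1).map (pyA_val nv freeL ((mb:Nat):Int))) :=
        (List.foldl_map (f := pyA_val nv freeL ((mb:Nat):Int)) (g := PySem.Set.add)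
          (l := PySem.List.pyRange 0 ((2:Int) ^ freeL.length) 1) (init := m)).symm
    _ = List.foldl PySem.Set.add m ((pvGenB [mb] bs).map Int.ofNat) := by rw [hAlist]
    _ = List.foldl (fun x y => PySem.Set.add x (Int.ofNat y)) m (pvGenB [mb] bs) :=
        List.foldl_map (f := Int.ofNat) (g := PySem.Set.add) (l := pvGenB [mb] bs) (init := m)

-- ===== VERDICT (by name: the statement is the Claim_ definition above) =====
theorem parse_to_minterms_py_spec : Claim_equal_parse_to_minterms_py := by
  intro expr var_names _
  unfold Spec_parse_to_minterms_py parse_to_minterms_py parse_to_minterms_py_alt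
  dsimp only
  have hrel : ∀ v, ((PySem.List.enumerate var_names).foldl
        (fun d p => d.insert p.2 ((var_names.length : Int) - 1 - p.1)) PySem.Dict.empty).get? v
      = (((PySem.List.enumerate var_names).foldl (fun d p => d.insert p.2 p.1) PySem.Dict.empty).get? v).map
          (fun i => (var_names.length : Int) - 1 - i) :=
    pvDictFold (fun i => (var_names.length : Int) - 1 - i) var_names 0 PySem.Dict.empty PySem.Dict.empty
      (fun v => by simp)
  have hbnd : ∀ v i, (((PySem.List.enumerate var_names).foldl
        (fun d p => d.insert p.2 p.1) PySem.Dict.empty).get? v) = some i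
      → 0 ≤ i ∧ i < (var_names.length : Int) :=
    pvDictBound (var_names.length : Int) var_names 0 PySem.Dict.empty (le_refl 0)
      (by simp) (fun v i h => by rw [PySem.Dict.get?_empty] at h; cases h)
  exact PySem.List.foldl_congr_mem _ _ _ _
    (fun acc x _ => pvTerm_eq var_names.length _ _ hrel hbnd acc x)
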